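-- pv_equiv track=rewrite | github.com/LLighty/CyberSecTools | encryptions/src/algorithms/algorithms.py | decode_caesar_cipher
-- ===== SOURCE A (Python) =====
-- def decode_caesar_cipher(data, rotate):
--     if rotate < 0:
--         return "Cannot have a negative rotation"
--     if rotate == 0:
--         return data
--     decoded_string = ''
--     for char in data:
--         if char == ' ':
--             decoded_string += ' '
--             continue
--         char_int = ord(char)
--         # Do not want to change special characters
--         if char_int < 65:
--             decoded_string += char
--             continue
--         if 90 < char_int < 97:
--             decoded_string += char
--             continue
--         if char_int > 122:
--             decoded_string += char
--             continue
--         if check_capital_letter(char):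
--             char_int -= 65
--             char_int = rotate_backwards(char_int, rotate)
--             char_int += 65
--             decoded_string += chr(char_int)
--         else:
--             char_int -= 97
--             char_int = rotate_backwards(char_int, rotate)
--             char_int += 97
--             decoded_string += chr(char_int)
--     return decoded_string
--
-- def rotate_backwards(char_int, amount):
--     for i in range(amount):
--         char_int -= 1
--         if char_int < 0:
--             char_int = 25
--     return char_int
--
-- def check_capital_letter(char):
--     return ord(char) < 91
-- ===== SOURCE B (Python) =====
-- def decode_caesar_cipher(data, rotate):
--     if rotate < 0:
--         return "Cannot have a negative rotation"
--     if rotate == 0: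
--         return data
--     r = rotate % 26
--     out = []
--     for char in data:
--         c = ord(char)
--         if 65 <= c <= 90:
--             out.append(chr(65 + (c - 65 - r) % 26))
--         elif 97 <= c <= 122:
--             out.append(chr(97 + (c - 97 - r) % 26))
--         else:
--             out.append(char)
--     return ''.join(out)
-- ===== Notes on version B (the rewrite author's own statement) =====
-- stated objective: faster
-- what changed: Replaces the per-character rotate-step loop (rotate iterations of decrement-and-wrap per letter) with a single modular-arithmetic formula (c - rotate % 26) % 26, building the output as a list joined once instead of repeated string concatenation.
import Mathlib
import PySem

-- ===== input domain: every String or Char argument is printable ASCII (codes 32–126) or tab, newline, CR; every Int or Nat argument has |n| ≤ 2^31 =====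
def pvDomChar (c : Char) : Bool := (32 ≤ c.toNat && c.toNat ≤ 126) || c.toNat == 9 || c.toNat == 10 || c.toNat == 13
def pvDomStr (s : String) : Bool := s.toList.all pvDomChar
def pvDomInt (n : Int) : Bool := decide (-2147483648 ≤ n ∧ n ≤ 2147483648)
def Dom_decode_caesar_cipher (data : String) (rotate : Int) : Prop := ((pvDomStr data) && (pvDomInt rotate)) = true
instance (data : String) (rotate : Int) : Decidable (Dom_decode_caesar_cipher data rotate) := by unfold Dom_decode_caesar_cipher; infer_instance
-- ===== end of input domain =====

-- B replaces A's per-letter rotate-step loop with one modular-arithmetic formula, (c - rotate % 26) % 26 (faster).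

-- ===== PORT A =====
-- for i in range(amount): char_int -= 1; if char_int < 0: char_int = 25
def pv_rotate_backwards (char_int : Int) (amount : Int) : Int :=
  (PySem.List.pyRange 0 amount 1).foldl
    (fun ci _ => let ci := ci - 1; if ci < 0 then 25 else ci) char_int

def pv_check_capital_letter (ch : Char) : Bool := decide ((ch.toNat : Int) < 91)

def decode_caesar_cipher (data : String) (rotate : Int) : String :=
  if rotate < 0 then "Cannot have a negative rotation"
  else if rotate = 0 then data
  else
    String.mk (data.toList.foldl (fun acc ch =>
      if ch = ' ' then acc ++ [' ']
      else
        let ci : Int := ch.toNat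
        if ci < 65 then acc ++ [ch]
        else if 90 < ci ∧ ci < 97 then acc ++ [ch]
        else if ci > 122 then acc ++ [ch]
        else if pv_check_capital_letter ch then
          acc ++ [Char.ofNat (pv_rotate_backwards (ci - 65) rotate + 65).toNat]
        else
          acc ++ [Char.ofNat (pv_rotate_backwards (ci - 97) rotate + 97).toNat]) ([] : List Char))

-- ===== PORT B =====
def pvCaesarChar (r : Int) (ch : Char) : Char :=
  let c : Int := ch.toNat
  if 65 ≤ c ∧ c ≤ 90 then Char.ofNat (65 + PySem.Int.mod (c - 65 - r) 26).toNat
  else if 97 ≤ c ∧ c ≤ 122 then Char.ofNat (97 + PySem.Int.mod (c - 97 - r) 26).toNat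
  else ch

def decode_caesar_cipher_alt (data : String) (rotate : Int) : String :=
  if rotate < 0 then "Cannot have a negative rotation"
  else if rotate = 0 then data
  else String.mk (data.toList.map (pvCaesarChar (PySem.Int.mod rotate 26)))

-- ===== PRECONDITION & SPEC =====
def Spec_decode_caesar_cipher (data : String) (rotate : Int) (out : String) : Prop := out = decode_caesar_cipher_alt data rotate
instance (data : String) (rotate : Int) (out : String) : Decidable (Spec_decode_caesar_cipher data rotate out) := by unfold Spec_decode_caesar_cipher; infer_instance

-- ===== CLAIM (what is proved, stated in full; the proofs are below) =====
def Claim_equal_decode_caesar_cipher : Prop := ∀ (data : String) (rotate : Int), Dom_decode_caesar_cipher data rotate → Spec_decode_caesar_cipher data rotate (decode_caesar_cipher data rotate)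

-- ===== LEMMAS AND PROOFS =====

-- A's decrement-and-wrap loop over any list only depends on its length: it is subtraction mod 26.
theorem pv_foldl_step_len (l : List Int) (c : Int) (h0 : 0 ≤ c) (h26 : c < 26) :
    l.foldl (fun ci _ => let ci := ci - 1; if ci < 0 then 25 else ci) c
      = (c - l.length) % 26 := by
  induction l generalizing c with
  | nil => simp; omega
  | cons x l ih =>
    simp only [List.foldl_cons, List.length_cons]
    by_cases h : c - 1 < 0
    · rw [if_pos h] at *
      rw [ih 25 (by omega) (by omega)]
      omega
    · rw [if_neg h]
      rw [ih (c - 1) (by omega) (by omega)]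
      push_cast
      omega

theorem pv_rotate_backwards_eq (c rot : Int) (h0 : 0 ≤ c) (h26 : c < 26) (hr : 0 ≤ rot) :
    pv_rotate_backwards c rot = (c - rot) % 26 := by
  unfold pv_rotate_backwards
  rw [pv_foldl_step_len _ c h0 h26, PySem.List.length_pyRange_one]
  have : (((rot - 0).toNat : ℤ)) = rot := by omega
  rw [this]

theorem pv_char_eq (rot : Int) (hrot : 0 < rot) (acc : List Char) (ch : Char) :
    (if ch = ' ' then acc ++ [' ']
      else
        let ci : Int := ch.toNat
        if ci < 65 then acc ++ [ch]
        else if 90 < ci ∧ ci < 97 then acc ++ [ch]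
        else if ci > 122 then acc ++ [ch]
        else if pv_check_capital_letter ch then
          acc ++ [Char.ofNat (pv_rotate_backwards (ci - 65) rot + 65).toNat]
        else
          acc ++ [Char.ofNat (pv_rotate_backwards (ci - 97) rot + 97).toNat])
      = acc ++ [pvCaesarChar (PySem.Int.mod rot 26) ch] := by
  have hmod : PySem.Int.mod rot 26 = rot % 26 := PySem.Int.mod_eq_emod_of_pos (by omega)
  by_cases hsp : ch = ' '
  · subst hsp
    simp [pvCaesarChar]
  · rw [if_neg hsp]
    simp only []
    set ci : Int := (ch.toNat : Int) with hci
    by_cases h1 : ci < 65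
    · rw [if_pos h1]
      have : pvCaesarChar (PySem.Int.mod rot 26) ch = ch := by
        unfold pvCaesarChar
        rw [if_neg (by omega), if_neg (by omega)]
      rw [this]
    · rw [if_neg h1]
      by_cases h2 : 90 < ci ∧ ci < 97
      · rw [if_pos h2]
        have : pvCaesarChar (PySem.Int.mod rot 26) ch = ch := by
          unfold pvCaesarChar
          rw [if_neg (by omega), if_neg (by omega)]
        rw [this]
      · rw [if_neg h2]
        by_cases h3 : ci > 122
        · rw [if_pos h3]
          have : pvCaesarChar (PySem.Int.mod rot 26) ch = ch := by
            unfold pvCaesarChar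
            rw [if_neg (by omega), if_neg (by omega)]
          rw [this]
        · rw [if_neg h3]
          by_cases h4 : pv_check_capital_letter ch = true
          · have hcap : ci < 91 := by
              simpa [pv_check_capital_letter, hci] using h4
            rw [if_pos h4]
            have hub : ci ≤ 90 := by omega
            have hlb : 65 ≤ ci := by omega
            rw [pv_rotate_backwards_eq (ci - 65) rot (by omega) (by omega) (by omega)]
            simp only [pvCaesarChar, ← hci, if_pos (And.intro hlb hub)]
            congr 2
            rw [hmod, PySem.Int.mod_eq_emod_of_pos (by omega)]
            rw [Int.sub_emod (ci - 65) (rot % 26), Int.emod_emod_of_dvd rot (dvd_refl 26),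
                ← Int.sub_emod (ci - 65) rot]
            congr 1
            omega
          · have hcap : ¬ ci < 91 := by
              simpa [pv_check_capital_letter, hci] using h4
            rw [if_neg h4]
            have hlb : 97 ≤ ci := by omega
            have hub : ci ≤ 122 := by omega
            rw [pv_rotate_backwards_eq (ci - 97) rot (by omega) (by omega) (by omega)]
            have hnot : ¬ (65 ≤ ci ∧ ci ≤ 90) := by omega
            simp only [pvCaesarChar, ← hci, if_neg hnot, if_pos (And.intro hlb hub)]
            congr 2
            rw [hmod, PySem.Int.mod_eq_emod_of_pos (by omega)]
            rw [Int.sub_emod (ci - 97) (rot % 26), Int.emod_emod_of_dvd rot (dvd_refl 26),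
                ← Int.sub_emod (ci - 97) rot]
            congr 1
            omega

theorem pv_foldl_map (g : Char → Char)
    (f : List Char → Char → List Char)
    (H : ∀ acc ch, f acc ch = acc ++ [g ch]) :
    ∀ (l : List Char) (acc : List Char), l.foldl f acc = acc ++ l.map g := by
  intro l
  induction l with
  | nil => intro acc; simp
  | cons x l ih =>
    intro acc
    simp [List.foldl_cons, H, ih]

-- ===== VERDICT (by name: the statement is the Claim_ definition above) =====
theorem decode_caesar_cipher_spec : Claim_equal_decode_caesar_cipher := by
  unfold Claim_equal_decode_caesar_cipher
  intro data rotate _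
  unfold Spec_decode_caesar_cipher decode_caesar_cipher decode_caesar_cipher_alt
  by_cases h1 : rotate < 0
  · simp [h1]
  · rw [if_neg h1, if_neg h1]
    by_cases h2 : rotate = 0
    · simp [h2]
    · rw [if_neg h2, if_neg h2]
      have hrot : 0 < rotate := by omega
      congr 1
      rw [pv_foldl_map (pvCaesarChar (PySem.Int.mod rotate 26)) _
            (fun acc ch => pv_char_eq rotate hrot acc ch) data.toList []]
      simp
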